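-- pv_equiv track=rewrite | github.com/helloAlgorithms/helloAlgorithms | StepByStep/기하1/jekim/1004.py | solution
-- ===== SOURCE A (Python) =====
-- class point:
--     def __init__(self, x : int, y : int):
--         self.x = x
--         self.y = y
--
-- class circle:
--     def __init__(self, x : int, y : int, r : int):
--         self.x = x
--         self.y = y
--         self.r = r
--
--     def get_distance_to_point(self, p : point) -> int:
--         return (p.x - self.x) ** 2 + (p.y - self.y) ** 2
--
-- def solution(coordinate_list : list, circle_coor_list : list, circle_list_len : int) -> int:
--     answer = 0
--     start_point = point(coordinate_list[0], coordinate_list[1])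
--     destination_point = point(coordinate_list[2], coordinate_list[3])
--     circle_list = []
--     for i in range(circle_list_len):
--         tmp = circle(circle_coor_list[i][0], circle_coor_list[i][1], circle_coor_list[i][2])
--         circle_list.append(tmp)
--
--     for i in range(circle_list_len):
--         dis1 = circle_list[i].get_distance_to_point(start_point)
--         dis2 = circle_list[i].get_distance_to_point(destination_point)
--         pow_cr = circle_list[i].r ** 2
--
--         if pow_cr > dis1 and pow_cr > dis2:
--             pass
--         elif pow_cr > dis1 or pow_cr > dis2:
--             answer += 1
--     return answer
-- ===== SOURCE B (Python) =====
-- def solution(coordinate_list, circle_coor_list, circle_list_len):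
--     sx, sy = coordinate_list[0], coordinate_list[1]
--     tx, ty = coordinate_list[2], coordinate_list[3]
--     rows = circle_coor_list[:max(circle_list_len, 0)]
--     in_start = sum(1 for row in rows
--                    if (row[0] - sx) ** 2 + (row[1] - sy) ** 2 < row[2] ** 2)
--     in_dest = sum(1 for row in rows
--                   if (row[0] - tx) ** 2 + (row[1] - ty) ** 2 < row[2] ** 2)
--     in_both = sum(1 for row in rows
--                   if (row[0] - sx) ** 2 + (row[1] - sy) ** 2 < row[2] ** 2
--                   and (row[0] - tx) ** 2 + (row[1] - ty) ** 2 < row[2] ** 2)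
--     # |S ^ T| = |S| + |T| - 2|S & T| (inclusion-exclusion on the two inside-sets)
--     return in_start + in_dest - 2 * in_both
-- ===== Notes on version B (the rewrite author's own statement) =====
-- stated objective: alternative
-- what changed: Instead of A's per-circle if/elif case analysis accumulating an answer in one indexed loop, B slices off the first circle_list_len rows and takes three independent counting passes (circles containing the start, containing the destination, containing both) and combines them with the inclusion-exclusion identity |S^T| = |S|+|T|-2|S&T|; the point/circle classes are dropped.
import Mathlib
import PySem

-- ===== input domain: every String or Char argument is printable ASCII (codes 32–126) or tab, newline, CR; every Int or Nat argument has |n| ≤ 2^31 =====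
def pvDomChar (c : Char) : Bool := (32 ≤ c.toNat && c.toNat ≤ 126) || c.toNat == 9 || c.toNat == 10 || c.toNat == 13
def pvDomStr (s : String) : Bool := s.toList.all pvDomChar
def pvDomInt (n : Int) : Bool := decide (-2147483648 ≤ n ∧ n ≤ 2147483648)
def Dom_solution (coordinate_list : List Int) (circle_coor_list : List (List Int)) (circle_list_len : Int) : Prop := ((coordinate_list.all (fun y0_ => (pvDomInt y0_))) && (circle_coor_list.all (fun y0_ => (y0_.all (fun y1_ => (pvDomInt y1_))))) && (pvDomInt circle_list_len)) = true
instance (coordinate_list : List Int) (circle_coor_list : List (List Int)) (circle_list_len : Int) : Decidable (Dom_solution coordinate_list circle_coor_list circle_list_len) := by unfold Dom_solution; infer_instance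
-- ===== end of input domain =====

-- B drops A's classes and single if/elif accumulator loop: it counts circles containing the
-- start, the destination, and both, in three passes, and combines them by inclusion-exclusion
-- (objective: alternative decomposition, same cost).

-- ===== PORT A =====
-- circle(...) constructor: the triple (x, y, r) read from row i of circle_coor_list
def mkCircle (circle_coor_list : List (List Int)) (i : Int) : Int × Int × Int :=
  let row := PySem.List.pyGetD circle_coor_list i []
  (PySem.List.pyGetD row 0 0, PySem.List.pyGetD row 1 0, PySem.List.pyGetD row 2 0)

def solution (coordinate_list : List Int) (circle_coor_list : List (List Int)) (circle_list_len : Int) : Int :=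
  let sx := PySem.List.pyGetD coordinate_list 0 0
  let sy := PySem.List.pyGetD coordinate_list 1 0
  let dx := PySem.List.pyGetD coordinate_list 2 0
  let dy := PySem.List.pyGetD coordinate_list 3 0
  let circle_list : List (Int × Int × Int) :=
    (PySem.List.pyRange 0 circle_list_len 1).foldl
      (fun acc i => acc ++ [mkCircle circle_coor_list i]) []
  (PySem.List.pyRange 0 circle_list_len 1).foldl
    (fun answer i =>
      let c := PySem.List.pyGetD circle_list i (0, 0, 0)
      let dis1 := (sx - c.1) ^ 2 + (sy - c.2.1) ^ 2
      let dis2 := (dx - c.1) ^ 2 + (dy - c.2.1) ^ 2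
      let pow_cr := c.2.2 ^ 2
      if pow_cr > dis1 ∧ pow_cr > dis2 then answer
      else if pow_cr > dis1 ∨ pow_cr > dis2 then answer + 1
      else answer) 0

-- ===== PORT B =====
-- the generator condition '(row[0]-px)**2 + (row[1]-py)**2 < row[2]**2' of Source B
def insideB (px py : Int) (row : List Int) : Bool :=
  decide ((PySem.List.pyGetD row 0 0 - px) ^ 2 + (PySem.List.pyGetD row 1 0 - py) ^ 2
            < (PySem.List.pyGetD row 2 0) ^ 2)

def solution_alt (coordinate_list : List Int) (circle_coor_list : List (List Int)) (circle_list_len : Int) : Int :=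
  let sx := PySem.List.pyGetD coordinate_list 0 0
  let sy := PySem.List.pyGetD coordinate_list 1 0
  let tx := PySem.List.pyGetD coordinate_list 2 0
  let ty := PySem.List.pyGetD coordinate_list 3 0
  let rows := PySem.List.slice circle_coor_list none (some (max circle_list_len 0))
  -- each 'sum(1 for row in rows if …)' is the count of rows satisfying the condition
  let in_start : Int := rows.countP (insideB sx sy)
  let in_dest : Int := rows.countP (insideB tx ty)
  let in_both : Int := rows.countP (fun row => insideB sx sy row && insideB tx ty row)
  in_start + in_dest - 2 * in_both

-- ===== PRECONDITION & SPEC =====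
-- Pre_ excludes exactly the inputs on which Python A raises IndexError: fewer than 4
-- coordinates, fewer rows than circle_list_len, or a referenced row shorter than 3.
def Pre_solution (coordinate_list : List Int) (circle_coor_list : List (List Int)) (circle_list_len : Int) : Prop :=
  4 ≤ coordinate_list.length ∧ circle_list_len ≤ (circle_coor_list.length : Int) ∧
  ∀ row ∈ circle_coor_list.take circle_list_len.toNat, 3 ≤ row.length
instance (coordinate_list : List Int) (circle_coor_list : List (List Int)) (circle_list_len : Int) : Decidable (Pre_solution coordinate_list circle_coor_list circle_list_len) := by unfold Pre_solution; infer_instance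

def pvWitness_solution : List Int × List (List Int) × Int := ([0, 0, 5, 5], [[1, 1, 2], [3, 3, 9]], 2)

def Spec_solution (coordinate_list : List Int) (circle_coor_list : List (List Int)) (circle_list_len : Int) (out : Int) : Prop := out = solution_alt coordinate_list circle_coor_list circle_list_len
instance (coordinate_list : List Int) (circle_coor_list : List (List Int)) (circle_list_len : Int) (out : Int) : Decidable (Spec_solution coordinate_list circle_coor_list circle_list_len out) := by unfold Spec_solution; infer_instance

-- ===== CLAIM (what is proved, stated in full; the proofs are below) =====
def Claim_equal_solution : Prop := ∀ (coordinate_list : List Int) (circle_coor_list : List (List Int)) (circle_list_len : Int), Dom_solution coordinate_list circle_coor_list circle_list_len → Pre_solution coordinate_list circle_coor_list circle_list_len → Spec_solution coordinate_list circle_coor_list circle_list_len (solution coordinate_list circle_coor_list circle_list_len)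

-- ===== LEMMAS AND PROOFS =====

-- A's if/elif accumulator counts indices where exactly one of P, Q holds; expressed
-- by inclusion-exclusion it is #P + #Q - 2 #(P ∧ Q).
theorem foldl_xor_count {α : Type} (P Q : α → Bool) (l : List α) (a : Int) :
    l.foldl (fun answer i =>
      if P i = true ∧ Q i = true then answer
      else if P i = true ∨ Q i = true then answer + 1
      else answer) a
    = a + (l.countP P : Int) + (l.countP Q : Int)
        - 2 * (l.countP (fun i => P i && Q i) : Int) := by
  induction l generalizing a with
  | nil => simp
  | cons x xs ih =>
    cases hp : P x <;> cases hq : Q x <;>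
      simp [List.foldl_cons, hp, hq, ih] <;> omega

-- counting over range indices 0..m through pyGetD is counting over the first m rows
theorem countP_range_take (ccl : List (List Int)) (p : List Int → Bool) (m : Nat)
    (h : m ≤ ccl.length) :
    (PySem.List.pyRange 0 (m : Int) 1).countP (fun i => p (PySem.List.pyGetD ccl i []))
      = (ccl.take m).countP p := by
  induction m with
  | zero => simp [PySem.List.pyRange_one_eq_nil]
  | succ k ih =>
    have hk : k < ccl.length := h
    rw [show ((k + 1 : Nat) : Int) = (k : Int) + 1 by push_cast; ring,
        PySem.List.pyRange_one_succ_right (by positivity),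
        List.countP_append, ih (Nat.le_of_lt hk), List.take_add_one, List.countP_append]
    simp [PySem.List.pyGetD_natCast, List.getD_eq_getElem?_getD, List.getElem?_eq_getElem hk]

-- ===== VERDICT (by name: the statement is the Claim_ definition above) =====
theorem solution_spec : Claim_equal_solution := by
  intro cl ccl n _ pre
  obtain ⟨-, hn, -⟩ := pre
  show _ = _
  unfold solution solution_alt
  simp only []
  rw [PySem.List.foldl_append_singleton_eq_map]
  -- replace pyGetD into the built circle list by the direct row read
  rw [PySem.List.foldl_congr_mem _ _ (fun answer i =>
      if insideB (PySem.List.pyGetD cl 0 0) (PySem.List.pyGetD cl 1 0) (PySem.List.pyGetD ccl i []) = true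
           ∧ insideB (PySem.List.pyGetD cl 2 0) (PySem.List.pyGetD cl 3 0) (PySem.List.pyGetD ccl i []) = true then answer
      else if insideB (PySem.List.pyGetD cl 0 0) (PySem.List.pyGetD cl 1 0) (PySem.List.pyGetD ccl i []) = true
           ∨ insideB (PySem.List.pyGetD cl 2 0) (PySem.List.pyGetD cl 3 0) (PySem.List.pyGetD ccl i []) = true then answer + 1
      else answer) 0
    (by
      intro answer i hi
      rw [PySem.List.mem_pyRange_one] at hi
      simp only [List.nil_append, PySem.List.pyGetD_map_pyRange_of_nonneg _ _ _ _ hi.1 hi.2]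
      simp only [mkCircle, insideB, gt_iff_lt, decide_eq_true_eq]
      ring_nf)]
  rw [foldl_xor_count]
  by_cases hle : n ≤ 0
  · rw [PySem.List.pyRange_one_eq_nil hle]
    simp [show max n 0 = 0 from max_eq_right hle, PySem.List.slice_to ccl le_rfl]
  · have hpos : 0 ≤ n := by omega
    have hmax : max n 0 = n := max_eq_left hpos
    have hcast : n = (n.toNat : Int) := (Int.toNat_of_nonneg hpos).symm
    have hlen : n.toNat ≤ ccl.length := by omega
    rw [hmax, PySem.List.slice_to ccl hpos, hcast,
        countP_range_take _ _ _ hlen, countP_range_take _ _ _ hlen,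
        countP_range_take ccl (fun row =>
          insideB (PySem.List.pyGetD cl 0 0) (PySem.List.pyGetD cl 1 0) row &&
          insideB (PySem.List.pyGetD cl 2 0) (PySem.List.pyGetD cl 3 0) row) _ hlen]
    simp only [Int.toNat_natCast]
    ring
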